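-- pv_equiv track=rewrite | github.com/Maria-Constantin/AGTN | Data Pipeline/M1/M1.py | findCombineDiff
-- ===== SOURCE A (Python) =====
-- def findCombineDiff(dataset1,dataset2): # finds differences between 2 sets of data
--     # [list],[list] -> [list]
--     # this function assumes that both dataset1 and dataset2 are clean
--
--     # Sub-Program I : finds the 2-way differences
--     d1NotInD2 = []
--     d2NotInD1 = []
--
--     for i in dataset1:
--         if i not in dataset2:
--             d1NotInD2.append(i)
--
--     for j in dataset2:
--         if j not in dataset1:
--             d2NotInD1.append(j)
--
--     # Sub-Program II : Combines those 2 lists into 1 (and avoids duplication)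
--     diff = d1NotInD2
--
--     for i in d2NotInD1:
--         if i not in diff:
--             diff.append(i)
--
--     # Sub-Program III : Combined the diffSet with the latest dataset to form the update set
--     result = dataset2
--
--     for k in diff:
--         if k not in result:
--             result.append(k)
--
--     return result # this returns a nested list s.t. list[0] = schema and list[1:] = data
-- ===== SOURCE B (Python) =====
-- def findCombineDiff(dataset1, dataset2):
--     # union: dataset2 followed by the elements of dataset1 not already present,
--     # deduplicated against the growing result; mutates dataset2 like A does.
--     result = dataset2
--     for i in dataset1:
--         if i not in result:
--             result.append(i)
--     return result
-- ===== Notes on version B (the rewrite author's own statement) =====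
-- stated objective: simpler
-- what changed: Replaced A's four-loop symmetric-difference machinery (d1NotInD2, d2NotInD1, their merge, then merge into dataset2) by a single loop appending each dataset1 element not already in the growing result; the d2NotInD1 branch never affects the result since those elements are already in dataset2.
import Mathlib
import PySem

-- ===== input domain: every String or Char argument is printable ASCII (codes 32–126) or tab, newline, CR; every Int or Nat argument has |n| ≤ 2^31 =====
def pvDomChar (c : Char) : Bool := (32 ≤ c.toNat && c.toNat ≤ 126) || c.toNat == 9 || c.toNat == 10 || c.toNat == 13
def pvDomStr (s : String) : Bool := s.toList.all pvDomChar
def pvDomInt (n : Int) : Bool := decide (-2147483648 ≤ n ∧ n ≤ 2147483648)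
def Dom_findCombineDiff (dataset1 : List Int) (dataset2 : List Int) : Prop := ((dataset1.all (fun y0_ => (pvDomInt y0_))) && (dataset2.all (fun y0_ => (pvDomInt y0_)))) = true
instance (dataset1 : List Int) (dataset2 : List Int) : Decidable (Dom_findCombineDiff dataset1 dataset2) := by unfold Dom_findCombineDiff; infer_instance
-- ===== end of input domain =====

-- B replaces A's four symmetric-difference loops by one dedup-append loop over dataset1
-- (simpler); equivalence of the RETURN value is proved — both Pythons also mutate
-- dataset2 identically (result aliases dataset2 and is appended to in place).

-- ===== PORT A =====
-- step for step: each "for … if … append" loop is a foldl appending to its list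
def findCombineDiff (dataset1 : List Int) (dataset2 : List Int) : List Int :=
  let d1NotInD2 := dataset1.foldl (fun acc i => if i ∈ dataset2 then acc else acc ++ [i]) []
  let d2NotInD1 := dataset2.foldl (fun acc j => if j ∈ dataset1 then acc else acc ++ [j]) []
  let diff := d2NotInD1.foldl (fun acc i => if i ∈ acc then acc else acc ++ [i]) d1NotInD2
  diff.foldl (fun acc k => if k ∈ acc then acc else acc ++ [k]) dataset2

-- ===== PORT B =====
def findCombineDiff_alt (dataset1 : List Int) (dataset2 : List Int) : List Int :=
  dataset1.foldl (fun acc i => if i ∈ acc then acc else acc ++ [i]) dataset2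

-- ===== PRECONDITION & SPEC =====
def Spec_findCombineDiff (dataset1 : List Int) (dataset2 : List Int) (out : List Int) : Prop := out = findCombineDiff_alt dataset1 dataset2
instance (dataset1 : List Int) (dataset2 : List Int) (out : List Int) : Decidable (Spec_findCombineDiff dataset1 dataset2 out) := by unfold Spec_findCombineDiff; infer_instance

-- ===== CLAIM (what is proved, stated in full; the proofs are below) =====
def Claim_equal_findCombineDiff : Prop := ∀ (dataset1 : List Int) (dataset2 : List Int), Dom_findCombineDiff dataset1 dataset2 → Spec_findCombineDiff dataset1 dataset2 (findCombineDiff dataset1 dataset2)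

-- ===== LEMMAS AND PROOFS =====

-- the dedup-append step preserves membership of the accumulator
theorem pv_mem_step (acc : List Int) (a x : Int) (h : x ∈ acc) :
    x ∈ (if a ∈ acc then acc else acc ++ [a]) := by
  split_ifs <;> simp [h]

theorem pv_mem_foldl (xs : List Int) (acc : List Int) (x : Int) (h : x ∈ acc) :
    x ∈ xs.foldl (fun acc i => if i ∈ acc then acc else acc ++ [i]) acc := by
  induction xs generalizing acc with
  | nil => exact h
  | cons a t ih => exact ih _ (pv_mem_step acc a x h)

-- folding elements already present does nothing
theorem pv_foldl_skip (xs : List Int) (acc : List Int) (h : ∀ x ∈ xs, x ∈ acc) :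
    xs.foldl (fun acc i => if i ∈ acc then acc else acc ++ [i]) acc = acc := by
  induction xs with
  | nil => rfl
  | cons a t ih =>
    simp only [List.foldl_cons, if_pos (h a (List.mem_cons_self))]
    exact ih (fun x hx => h x (List.mem_cons_of_mem _ hx))

-- the dedup fold only appends elements drawn from its input list
theorem pv_foldl_append_subset (xs : List Int) (acc : List Int) :
    ∃ e, xs.foldl (fun acc i => if i ∈ acc then acc else acc ++ [i]) acc = acc ++ e ∧
      ∀ x ∈ e, x ∈ xs := by
  induction xs generalizing acc with
  | nil => exact ⟨[], by simp⟩
  | cons a t ih =>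
    simp only [List.foldl_cons]
    by_cases ha : a ∈ acc
    · obtain ⟨e, he, hsub⟩ := ih acc
      exact ⟨e, by simp [ha, he], fun x hx => List.mem_cons_of_mem _ (hsub x hx)⟩
    · obtain ⟨e, he, hsub⟩ := ih (acc ++ [a])
      refine ⟨a :: e, ?_, ?_⟩
      · simp [ha, he]
      · intro x hx
        rcases List.mem_cons.mp hx with h | h
        · simp [h]
        · exact List.mem_cons_of_mem _ (hsub x h)

-- A's first loop is a filter
theorem pv_filter_fold (xs ys l : List Int) :
    xs.foldl (fun acc i => if i ∈ ys then acc else acc ++ [i]) l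
      = l ++ xs.filter (fun i => decide (i ∉ ys)) := by
  induction xs generalizing l with
  | nil => simp
  | cons a t ih =>
    rw [List.foldl_cons, List.filter_cons]
    by_cases ha : a ∈ ys
    · rw [if_pos ha, if_neg (by simp [ha]), ih]
    · rw [if_neg ha, if_pos (by simp [ha]), ih]; simp

-- dedup-folding the filtered list equals dedup-folding the original, when the
-- filtered-out elements are already in the accumulator
theorem pv_fold_filter_eq (ys : List Int) (xs : List Int) (acc : List Int)
    (h : ∀ x ∈ ys, x ∈ acc) :
    (xs.filter (fun i => decide (i ∉ ys))).foldl
        (fun acc i => if i ∈ acc then acc else acc ++ [i]) acc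
      = xs.foldl (fun acc i => if i ∈ acc then acc else acc ++ [i]) acc := by
  induction xs generalizing acc with
  | nil => rfl
  | cons a t ih =>
    rw [List.filter_cons]
    by_cases ha : a ∈ ys
    · rw [if_neg (by simp [ha]), List.foldl_cons, if_pos (h a ha)]
      exact ih acc h
    · rw [if_pos (by simp [ha]), List.foldl_cons, List.foldl_cons]
      exact ih _ (fun x hx => pv_mem_step acc a x (h x hx))

-- ===== VERDICT (by name: the statement is the Claim_ definition above) =====
theorem findCombineDiff_spec : Claim_equal_findCombineDiff := by
  intro dataset1 dataset2 _
  unfold Spec_findCombineDiff findCombineDiff findCombineDiff_alt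
  simp only
  rw [pv_filter_fold, pv_filter_fold]
  simp only [List.nil_append]
  set d1 := dataset1.filter (fun i => decide (i ∉ dataset2)) with hd1
  set d2 := dataset2.filter (fun j => decide (j ∉ dataset1)) with hd2
  obtain ⟨e, he, hsub⟩ := pv_foldl_append_subset d2 d1
  rw [he, List.foldl_append]
  have hsub2 : ∀ x ∈ e, x ∈ dataset2 := fun x hx =>
    List.mem_of_mem_filter (hsub x hx)
  rw [pv_foldl_skip e _ (fun x hx => pv_mem_foldl _ _ _ (hsub2 x hx))]
  exact pv_fold_filter_eq dataset2 dataset1 dataset2 (fun _ h => h)
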